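-- pv_equiv track=rewrite | github.com/lkjhgfdsa2020/FVE | solax_io.py | _find_time_col
-- ===== SOURCE A (Python) =====
-- from typing import Optional
--
-- TIME_NAME_SET = {"update time", "updatetime", "update_time"}
--
-- def _find_time_col(cols) -> Optional[str]:
--     for c in cols:
--         if str(c).strip().lower() in TIME_NAME_SET:
--             return c
--     for c in cols:
--         s = str(c).lower()
--         if "update" in s and "time" in s:
--             return c
--     return None
-- ===== SOURCE B (Python) =====
-- from typing import Optional
--
-- TIME_NAME_SET = {"update time", "updatetime", "update_time"}
--
-- def _find_time_col(cols) -> Optional[str]: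
--     cand = None
--     for c in cols:
--         s = str(c)
--         if s.strip().lower() in TIME_NAME_SET:
--             return c
--         if cand is None:
--             low = s.lower()
--             if "update" in low and "time" in low:
--                 cand = c
--     return cand
-- ===== Notes on version B (the rewrite author's own statement) =====
-- stated objective: alternative
-- what changed: Replaces A's two sequential scans (exact-match pass, then substring pass) by a single pass that returns immediately on an exact match and carries a write-once 'first substring candidate' returned after the loop.
import Mathlib
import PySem

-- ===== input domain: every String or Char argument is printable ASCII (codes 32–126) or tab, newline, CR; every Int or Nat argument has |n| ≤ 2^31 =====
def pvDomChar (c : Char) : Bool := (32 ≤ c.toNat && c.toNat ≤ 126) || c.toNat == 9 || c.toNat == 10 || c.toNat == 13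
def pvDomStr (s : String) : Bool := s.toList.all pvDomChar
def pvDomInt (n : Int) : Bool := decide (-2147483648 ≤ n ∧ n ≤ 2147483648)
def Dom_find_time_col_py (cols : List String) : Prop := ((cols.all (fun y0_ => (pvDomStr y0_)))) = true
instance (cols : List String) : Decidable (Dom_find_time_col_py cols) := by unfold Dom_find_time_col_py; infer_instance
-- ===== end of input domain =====

-- B merges A's two sequential scans into one pass carrying a write-once substring candidate (objective: alternative decomposition).

-- ===== PORT A =====
def pvTimeNameSet : PySem.Set String :=
  PySem.Set.ofList ["update time", "updatetime", "update_time"]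

-- A's first loop: first exact (stripped, lowered) match
def pvLoopExact : List String → Option String
  | [] => none
  | c :: rest =>
    if PySem.Set.contains pvTimeNameSet (PySem.Str.lower (PySem.Str.strip c)) then some c
    else pvLoopExact rest

-- A's second loop: first column containing both "update" and "time" (lowered)
def pvLoopSub : List String → Option String
  | [] => none
  | c :: rest =>
    let s := PySem.Str.lower c
    if PySem.Str.isIn "update" s && PySem.Str.isIn "time" s then some c
    else pvLoopSub rest

def find_time_col_py (cols : List String) : Option String :=
  match pvLoopExact cols with
  | some c => some c
  | none => pvLoopSub cols

-- ===== PORT B =====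
-- single pass with a carried write-once candidate
def pvLoopB : List String → Option String → Option String
  | [], cand => cand
  | c :: rest, cand =>
    if PySem.Set.contains pvTimeNameSet (PySem.Str.lower (PySem.Str.strip c)) then some c
    else
      let cand' :=
        if cand.isNone then
          let low := PySem.Str.lower c
          if PySem.Str.isIn "update" low && PySem.Str.isIn "time" low then some c else cand
        else cand
      pvLoopB rest cand'

def find_time_col_py_alt (cols : List String) : Option String :=
  pvLoopB cols none

-- ===== PRECONDITION & SPEC =====
def Spec_find_time_col_py (cols : List String) (out : Option String) : Prop := out = find_time_col_py_alt cols
instance (cols : List String) (out : Option String) : Decidable (Spec_find_time_col_py cols out) := by unfold Spec_find_time_col_py; infer_instance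

-- ===== CLAIM (what is proved, stated in full; the proofs are below) =====
def Claim_equal_find_time_col_py : Prop := ∀ (cols : List String), Dom_find_time_col_py cols → Spec_find_time_col_py cols (find_time_col_py cols)

-- ===== LEMMAS AND PROOFS =====
-- loop invariant: pvLoopB with carried candidate = exact pass, else the candidate, else substring pass
theorem pvLoopB_eq (cols : List String) (cand : Option String) :
    pvLoopB cols cand =
      match pvLoopExact cols with
      | some c => some c
      | none => match cand with
        | some x => some x
        | none => pvLoopSub cols := by
  induction cols generalizing cand with
  | nil => cases cand <;> rfl
  | cons c rest ih =>
    simp only [pvLoopB, pvLoopExact, pvLoopSub, ih]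
    cases cand <;> split_ifs <;> simp_all

-- ===== VERDICT (by name: the statement is the Claim_ definition above) =====
theorem find_time_col_py_spec : Claim_equal_find_time_col_py := by
  intro cols _
  unfold Spec_find_time_col_py find_time_col_py find_time_col_py_alt
  rw [pvLoopB_eq]
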